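-- pv_equiv track=rewrite | github.com/Melvin-King/distributed_training | pipeline/pipe.py | _clock_cycles
-- ===== SOURCE A (Python) =====
-- from typing import Any, Iterable, Iterator, List, Optional, Union, Sequence, Tuple, cast
--
-- def _clock_cycles(num_batches: int, num_partitions: int) -> Iterable[List[Tuple[int, int]]]:
--     '''
--     Generate schedules for each clock cycle.
--
--     m: number of micro-batches
--     n: number of partitions
--     i: index of micro-batch
--     j: index of partition
--     k: clock number
--
--     k (i,j) (i,j) (i,j)
--     - ----- ----- -----
--     0 (0,0)
--     1 (1,0) (0,1)
--     2 (2,0) (1,1) (0,2)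
--     3       (2,1) (1,2)
--     4             (2,2)
--
--     Each schedule is a list of tuples. Each tuple contains the index of micro-batch and the index of partition.
--     This function yields schedules for each clock cycle.
--     '''
--
--
--     # BEGIN SOLUTION
--     m = num_batches
--     n = num_partitions
--
--     k_total = m + n - 1
--
--     for k in range(k_total):
--         schedule: List[Tuple[int, int]] = []
--
--
--         for i in range(m):
--             j = k - i
--
--             if 0 <= j < n:
--                 schedule.append((i, j))
--         yield schedule
-- ===== SOURCE B (Python) =====
-- def _clock_cycles(num_batches, num_partitions):
--     # Scatter: bucket each (batch, partition) pair into clock cycle i + j.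
--     cycles = [[] for _ in range(num_batches + num_partitions - 1)]
--     for i in range(num_batches):
--         for j in range(num_partitions):
--             cycles[i + j].append((i, j))
--     yield from cycles
-- ===== Notes on version B (the rewrite author's own statement) =====
-- stated objective: alternative
-- what changed: B inverts the traversal: instead of A's clock-major scan that tests every micro-batch i against 0 <= k-i < n for each of the m+n-1 clocks, B pre-allocates the m+n-1 empty schedules and does one batch-major scatter, appending (i, j) to bucket i+j for every (i, j) pair, so no membership test is ever evaluated.
import Mathlib
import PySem

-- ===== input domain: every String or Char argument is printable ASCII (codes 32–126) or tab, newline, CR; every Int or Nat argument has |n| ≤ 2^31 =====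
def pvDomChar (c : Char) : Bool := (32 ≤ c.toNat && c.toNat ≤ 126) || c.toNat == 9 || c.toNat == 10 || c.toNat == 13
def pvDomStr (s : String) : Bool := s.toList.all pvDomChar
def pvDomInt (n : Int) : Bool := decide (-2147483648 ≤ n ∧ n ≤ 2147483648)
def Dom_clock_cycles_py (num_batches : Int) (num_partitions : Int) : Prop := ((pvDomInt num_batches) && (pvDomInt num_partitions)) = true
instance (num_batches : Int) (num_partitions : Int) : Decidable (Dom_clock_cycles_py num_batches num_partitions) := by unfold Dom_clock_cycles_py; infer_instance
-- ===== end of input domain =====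

-- B replaces A's per-clock scan over all m micro-batches by a single batch-major scatter
-- into pre-allocated clock buckets (objective: alternative).

-- ===== PORT A =====
-- For each clock k in range(m+n-1), scan ALL i in range(m) and append (i, k-i) when 0 ≤ k-i < n.
def clock_cycles_py (num_batches : Int) (num_partitions : Int) : List (List (Int × Int)) :=
  let m := num_batches
  let n := num_partitions
  (PySem.List.pyRange 0 (m + n - 1) 1).map (fun k =>
    (PySem.List.pyRange 0 m 1).foldl (fun sch i =>
      if 0 ≤ k - i ∧ k - i < n then sch ++ [(i, k - i)] else sch) [])

-- ===== PORT B =====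
-- Allocate m+n-1 empty buckets, then for each (i, j) append (i, j) to bucket i+j; yield the buckets.
def clock_cycles_py_alt (num_batches : Int) (num_partitions : Int) : List (List (Int × Int)) :=
  let cycles := (PySem.List.pyRange 0 (num_batches + num_partitions - 1) 1).map
    (fun _ => ([] : List (Int × Int)))
  (PySem.List.pyRange 0 num_batches 1).foldl (fun cycles i =>
    (PySem.List.pyRange 0 num_partitions 1).foldl (fun cycles j =>
      cycles.modify (i + j).toNat (fun sch => sch ++ [(i, j)])) cycles) cycles

-- ===== PRECONDITION & SPEC =====
def Spec_clock_cycles_py (num_batches : Int) (num_partitions : Int) (out : List (List (Int × Int))) : Prop := out = clock_cycles_py_alt num_batches num_partitions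
instance (num_batches : Int) (num_partitions : Int) (out : List (List (Int × Int))) : Decidable (Spec_clock_cycles_py num_batches num_partitions out) := by unfold Spec_clock_cycles_py; infer_instance

-- ===== CLAIM =====
def Claim_equal_clock_cycles_py : Prop := ∀ (num_batches : Int) (num_partitions : Int), Dom_clock_cycles_py num_batches num_partitions → Spec_clock_cycles_py num_batches num_partitions (clock_cycles_py num_batches num_partitions)

-- ===== LEMMAS AND PROOFS =====

-- Common closed form both ports are reduced to: bucket k holds (i, k-i) for i in the
-- active interval [max 0 (k-n+1), min (t-1) k + 1) after t batches (t = m at the end).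
def pvGoldBucket (n t k : Int) : List (Int × Int) :=
  (PySem.List.pyRange (max 0 (k - n + 1)) (min (t - 1) k + 1) 1).map (fun i => (i, k - i))

def pvGold (m n : Int) : List (List (Int × Int)) :=
  (PySem.List.pyRange 0 (m + n - 1) 1).map (fun k => pvGoldBucket n m k)

-- ---- A = pvGold ----
-- Filtering an increasing integer range by membership in [lo, hi) is the clipped range.
theorem filter_pyRange_interval (lo hi : Int) :
    ∀ (N : Nat) (a b : Int), (b - a).toNat ≤ N →
      (PySem.List.pyRange a b 1).filter (fun i => decide (lo ≤ i ∧ i < hi)) =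
        PySem.List.pyRange (max a lo) (min b hi) 1 := by
  intro N
  induction N with
  | zero =>
    intro a b h
    rw [PySem.List.pyRange_one_eq_nil (by omega), PySem.List.pyRange_one_eq_nil (by omega)]
    rfl
  | succ N ih =>
    intro a b h
    by_cases hab : b ≤ a
    · rw [PySem.List.pyRange_one_eq_nil hab, PySem.List.pyRange_one_eq_nil (by omega)]
      rfl
    · replace hab : a < b := by omega
      rw [PySem.List.pyRange_one_cons hab, List.filter_cons]
      by_cases hp : lo ≤ a ∧ a < hi
      · rw [if_pos (by simp [hp]), ih (a + 1) b (by omega),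
          PySem.List.pyRange_one_cons (a := max a lo) (b := min b hi) (by omega)]
        have h1 : max a lo = a := by omega
        have h2 : max (a + 1) lo = a + 1 := by omega
        rw [h1, h2]
      · rw [if_neg (by simp [hp]), ih (a + 1) b (by omega)]
        by_cases hlo : a < lo
        · have hmx : max (a + 1) lo = max a lo := by omega
          rw [hmx]
        · rw [PySem.List.pyRange_one_eq_nil (by omega), PySem.List.pyRange_one_eq_nil (by omega)]

theorem a_inner (m n k : Int) :
    (PySem.List.pyRange 0 m 1).foldl (fun sch i =>
        if 0 ≤ k - i ∧ k - i < n then sch ++ [(i, k - i)] else sch) ([] : List (Int × Int)) =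
      pvGoldBucket n m k := by
  have hcond : (fun (sch : List (Int × Int)) i =>
      if 0 ≤ k - i ∧ k - i < n then sch ++ [(i, k - i)] else sch) =
      (fun sch i => if (fun i => decide (k - n + 1 ≤ i ∧ i < k + 1)) i
        then sch ++ [(fun i => (i, k - i)) i] else sch) := by
    funext sch i
    by_cases h : 0 ≤ k - i ∧ k - i < n
    · rw [if_pos h, if_pos (by simpa using (by omega : k - n + 1 ≤ i ∧ i < k + 1))]
    · rw [if_neg h, if_neg (by simp; omega)]
  rw [hcond, PySem.List.foldl_append_if,
    filter_pyRange_interval (k - n + 1) (k + 1) (m - 0).toNat 0 m le_rfl]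
  have : min m (k + 1) = min (m - 1) k + 1 := by omega
  simp [pvGoldBucket, this]

theorem a_eq_gold (m n : Int) : clock_cycles_py m n = pvGold m n :=
  List.map_congr_left (fun k _ => a_inner m n k)

-- ---- B = pvGold ----
-- One batch i of B's scatter: appends (i, j) to bucket i+j for j in [a, n).
def pvInner (n i a : Int) (c : List (List (Int × Int))) : List (List (Int × Int)) :=
  (PySem.List.pyRange a n 1).foldl (fun c j =>
    c.modify (i + j).toNat (fun sch => sch ++ [(i, j)])) c

theorem pvInner_get? (n i : Int) (hi : 0 ≤ i) :
    ∀ (N : Nat) (a : Int) (cs : List (List (Int × Int))) (k : Nat), 0 ≤ a →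
      (n - a).toNat ≤ N →
      (pvInner n i a cs)[k]? = Option.map (fun sch =>
        if i + a ≤ (k : Int) ∧ (k : Int) < i + n then sch ++ [(i, (k : Int) - i)] else sch)
          cs[k]? := by
  intro N
  induction N with
  | zero =>
    intro a cs k ha h
    rw [pvInner, PySem.List.pyRange_one_eq_nil (by omega), List.foldl_nil]
    cases cs[k]? with
    | none => simp
    | some x => simp only [Option.map_some]; rw [if_neg (by omega)]
  | succ N ih =>
    intro a cs k ha h
    by_cases hab : n ≤ a
    · rw [pvInner, PySem.List.pyRange_one_eq_nil hab, List.foldl_nil]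
      cases cs[k]? with
    | none => simp
    | some x => simp only [Option.map_some]; rw [if_neg (by omega)]
    · have hstep : pvInner n i a cs =
          pvInner n i (a + 1) (cs.modify (i + a).toNat (fun sch => sch ++ [(i, a)])) := by
        rw [pvInner, PySem.List.pyRange_one_cons (by omega), List.foldl_cons]; rfl
      rw [hstep, ih (a + 1) _ k (by omega) (by omega), List.getElem?_modify]
      cases cs[k]? with
      | none => simp
      | some x =>
        simp only [Option.map_eq_map, Option.map_some]
        by_cases heq : (i + a).toNat = k
        · have hia : i + a = (k : Int) := by omega
          rw [if_pos heq, if_neg (by omega), if_pos (by omega)]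
          have hax : a = (k : Int) - i := by omega
          rw [hax]
        · rw [if_neg heq]
          by_cases hc : i + (a + 1) ≤ (k : Int) ∧ (k : Int) < i + n
          · rw [if_pos hc, if_pos (by omega)]
          · rw [if_neg hc, if_neg (by omega)]

-- State of B's scatter after the first t batches.
def pvOuter (m n t : Int) : List (List (Int × Int)) :=
  (PySem.List.pyRange 0 t 1).foldl (fun cycles i => pvInner n i 0 cycles)
    ((PySem.List.pyRange 0 (m + n - 1) 1).map (fun _ => ([] : List (Int × Int))))

theorem pvOuter_get? (m n : Int) :
    ∀ (T : Nat) (k : Nat),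
      (pvOuter m n (T : Int))[k]? =
        if k < (m + n - 1).toNat then some (pvGoldBucket n (T : Int) (k : Int)) else none := by
  intro T
  induction T with
  | zero =>
    intro k
    rw [show pvOuter m n ((0 : Nat) : Int) = (PySem.List.pyRange 0 (m + n - 1) 1).map
        (fun _ => ([] : List (Int × Int))) by
      simp [pvOuter, PySem.List.pyRange_zero]]
    rw [List.getElem?_map, PySem.List.getElem?_pyRange_one]
    by_cases hk : k < (m + n - 1).toNat
    · rw [if_pos (by omega), if_pos hk, pvGoldBucket,
        PySem.List.pyRange_one_eq_nil (by omega)]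
      rfl
    · rw [if_neg (by omega), if_neg hk]
      rfl
  | succ T ih =>
    intro k
    have hcast : ((T + 1 : Nat) : Int) = (T : Int) + 1 := by push_cast; ring
    have hstep : pvOuter m n ((T : Int) + 1) = pvInner n (T : Int) 0 (pvOuter m n (T : Int)) := by
      rw [pvOuter, PySem.List.pyRange_one_succ_right (by positivity), List.foldl_append]; rfl
    rw [hcast, hstep,
      pvInner_get? n (T : Int) (by positivity) (n - 0).toNat 0 _ k le_rfl le_rfl, ih k]
    by_cases hk : k < (m + n - 1).toNat
    · rw [if_pos hk, if_pos hk, Option.map_some]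
      congr 1
      by_cases hc : (T : Int) + 0 ≤ (k : Int) ∧ (k : Int) < (T : Int) + n
      · rw [if_pos hc, pvGoldBucket, pvGoldBucket]
        have h1 : min ((T : Int) - 1) (k : Int) + 1 = (T : Int) := by omega
        have h2 : min (((T : Int) + 1) - 1) (k : Int) + 1 = (T : Int) + 1 := by omega
        rw [h1, h2, PySem.List.pyRange_one_succ_right (by omega), List.map_append]
        simp
      · rw [if_neg hc, pvGoldBucket, pvGoldBucket]
        by_cases hlt : (k : Int) < (T : Int)
        · have : min (((T : Int) + 1) - 1) (k : Int) = min ((T : Int) - 1) (k : Int) := by omega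
          rw [this]
        · rw [PySem.List.pyRange_one_eq_nil (by omega),
            PySem.List.pyRange_one_eq_nil (by omega)]
    · rw [if_neg hk, if_neg hk, Option.map_none]

theorem gold_get? (m n : Int) (k : Nat) :
    (pvGold m n)[k]? =
      if k < (m + n - 1).toNat then some (pvGoldBucket n m (k : Int)) else none := by
  rw [pvGold, List.getElem?_map, PySem.List.getElem?_pyRange_one]
  by_cases hk : k < (m + n - 1).toNat
  · rw [if_pos (by omega), if_pos hk, Option.map_some, zero_add]
  · rw [if_neg (by omega), if_neg hk]
    rfl

theorem b_eq_gold (m n : Int) : clock_cycles_py_alt m n = pvGold m n := by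
  have hB : clock_cycles_py_alt m n = pvOuter m n m := rfl
  by_cases hm : 0 ≤ m
  · obtain ⟨T, rfl⟩ : ∃ T : Nat, m = (T : Int) := ⟨m.toNat, by omega⟩
    apply List.ext_getElem?
    intro k
    rw [hB, pvOuter_get?, gold_get?]
  · -- m < 0: no batch is scattered, and every gold bucket is empty.
    have h0 : pvOuter m n m = pvOuter m n ((0 : Nat) : Int) := by
      rw [pvOuter, pvOuter,
        show PySem.List.pyRange 0 m 1 = [] from PySem.List.pyRange_one_eq_nil (by omega),
        show PySem.List.pyRange 0 ((0 : Nat) : Int) 1 = [] from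
          PySem.List.pyRange_one_eq_nil (by simp)]
    apply List.ext_getElem?
    intro k
    rw [hB, h0, pvOuter_get?, gold_get?]
    by_cases hk : k < (m + n - 1).toNat
    · rw [if_pos hk, if_pos hk, pvGoldBucket, pvGoldBucket,
        PySem.List.pyRange_one_eq_nil (by omega), PySem.List.pyRange_one_eq_nil (by omega)]
    · rw [if_neg hk, if_neg hk]

-- ===== VERDICT =====
theorem clock_cycles_py_spec : Claim_equal_clock_cycles_py := by
  intro m n _
  unfold Spec_clock_cycles_py
  rw [a_eq_gold, b_eq_gold]
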